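-- pv_equiv track=rewrite | github.com/dougfoo/karuisearch | src/scrapers/seibu_real_estate_scraper.py | filter_property_images
-- ===== SOURCE A (Python) =====
-- from typing import List, Optional, Dict, Any
--
-- def filter_property_images(img_urls: List[str]) -> List[str]:
--     """Filter image URLs to prioritize property photos over UI elements"""
--     if not img_urls:
--         return []
--
--     property_images = []
--     ui_images = []
--
--     for img_url in img_urls:
--         # Skip obvious UI elements
--         if any(skip in img_url.lower() for skip in [
--             'logo', 'icon', 'btn_', 'button', 'nav_', 'menu_', 'header', 'footer',
--             'arrow', 'bullet', 'spacer', 'line', 'bg_', 'background', 'banner'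
--         ]):
--             continue
--
--         # Prioritize property-related images
--         if any(priority in img_url.lower() for priority in [
--             'property', 'house', 'home', 'villa', 'building', 'exterior', 'interior',
--             'photo', 'image', 'gallery', 'main', 'view', 'room', 'estate', 'managed'
--         ]):
--             property_images.append(img_url)
--         else:
--             ui_images.append(img_url)
--
--     # Combine: property photos first, then other images
--     final_images = property_images + ui_images
--
--     # Limit to 5 images total
--     return final_images[:5]
-- ===== SOURCE B (Python) =====
-- SKIP_KEYWORDS = [
--     'logo', 'icon', 'btn_', 'button', 'nav_', 'menu_', 'header', 'footer',
--     'arrow', 'bullet', 'spacer', 'line', 'bg_', 'background', 'banner'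
-- ]
-- PRIORITY_KEYWORDS = [
--     'property', 'house', 'home', 'villa', 'building', 'exterior', 'interior',
--     'photo', 'image', 'gallery', 'main', 'view', 'room', 'estate', 'managed'
-- ]
--
--
-- def _is_skip(url):
--     low = url.lower()
--     return any(k in low for k in SKIP_KEYWORDS)
--
--
-- def _priority_key(url):
--     low = url.lower()
--     return 0 if any(k in low for k in PRIORITY_KEYWORDS) else 1
--
--
-- def filter_property_images(img_urls):
--     """Filter image URLs to prioritize property photos over UI elements."""
--     kept = [u for u in img_urls if not _is_skip(u)]
--     return sorted(kept, key=_priority_key)[:5]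
-- ===== Notes on version B (the rewrite author's own statement) =====
-- stated objective: idiomatic
-- what changed: Replaces the two explicit accumulator lists with a filter of skip-keyword URLs followed by a single stable sort keyed 0/1 on priority-keyword membership, then a [:5] slice.
import Mathlib
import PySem

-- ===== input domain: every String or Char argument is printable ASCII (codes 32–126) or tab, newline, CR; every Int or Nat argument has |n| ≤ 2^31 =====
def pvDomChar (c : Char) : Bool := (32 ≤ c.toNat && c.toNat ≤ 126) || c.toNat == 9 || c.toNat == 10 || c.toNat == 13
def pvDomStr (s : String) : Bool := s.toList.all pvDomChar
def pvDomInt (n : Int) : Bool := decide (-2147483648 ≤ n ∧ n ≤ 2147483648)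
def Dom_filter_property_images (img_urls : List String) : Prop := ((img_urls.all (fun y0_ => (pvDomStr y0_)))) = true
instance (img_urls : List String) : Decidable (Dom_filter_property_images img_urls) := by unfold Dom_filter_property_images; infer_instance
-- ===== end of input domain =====

-- B replaces A's two accumulator lists with filter + one stable 0/1-keyed sort + take 5 (idiomatic; same results).


-- ===== PORT A =====
def skipKeywords : List String :=
  ["logo", "icon", "btn_", "button", "nav_", "menu_", "header", "footer",
   "arrow", "bullet", "spacer", "line", "bg_", "background", "banner"]

def prioKeywords : List String :=
  ["property", "house", "home", "villa", "building", "exterior", "interior",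
   "photo", "image", "gallery", "main", "view", "room", "estate", "managed"]

-- literal port of A: empty guard, one loop keeping two append-accumulators, concat, [:5] (= take 5)
def filter_property_images (img_urls : List String) : List String :=
  if img_urls = [] then []
  else
    let st := img_urls.foldl (fun (acc : List String × List String) img_url =>
      if skipKeywords.any (fun skip => PySem.Str.isIn skip (PySem.Str.lower img_url)) then acc
      else if prioKeywords.any (fun priority => PySem.Str.isIn priority (PySem.Str.lower img_url)) then
        (acc.1 ++ [img_url], acc.2)
      else (acc.1, acc.2 ++ [img_url])) ([], [])
    (st.1 ++ st.2).take 5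

-- ===== PORT B =====
def isSkip (url : String) : Bool :=
  skipKeywords.any (fun k => PySem.Str.isIn k (PySem.Str.lower url))

def priorityKey (url : String) : Nat :=
  if prioKeywords.any (fun k => PySem.Str.isIn k (PySem.Str.lower url)) then 0 else 1

-- literal port of B: filter the skips out, one stable sort on the 0/1 key, [:5] (= take 5)
def filter_property_images_alt (img_urls : List String) : List String :=
  (PySem.List.sorted (img_urls.filter (fun u => !isSkip u)) priorityKey false).take 5

-- ===== PRECONDITION & SPEC =====
def Spec_filter_property_images (img_urls : List String) (out : List String) : Prop := out = filter_property_images_alt img_urls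
instance (img_urls : List String) (out : List String) : Decidable (Spec_filter_property_images img_urls out) := by unfold Spec_filter_property_images; infer_instance

-- ===== CLAIM (what is proved, stated in full; the proofs are below) =====
def Claim_equal_filter_property_images : Prop := ∀ (img_urls : List String), Dom_filter_property_images img_urls → Spec_filter_property_images img_urls (filter_property_images img_urls)

-- ===== LEMMAS AND PROOFS =====

theorem insertBy_nil {α : Type} (before : α → α → Bool) (x : α) :
    PySem.List.insertBy before x [] = [x] := rfl

theorem insertBy_cons {α : Type} (before : α → α → Bool) (x y : α) (ys : List α) :
    PySem.List.insertBy before x (y :: ys) =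
      if before x y then x :: y :: ys else y :: PySem.List.insertBy before x ys := rfl

-- inserting a 0-key element into (zeros ++ ones) lands exactly between them
theorem insertBy_zero_mid {α : Type} (key : α → Nat) (x : α) (f u : List α)
    (hx : key x = 0) (hf : ∀ y ∈ f, key y = 0) (hu : ∀ y ∈ u, key y = 1) :
    PySem.List.insertBy (fun a b => decide (key a < key b)) x (f ++ u) = f ++ x :: u := by
  induction f with
  | nil =>
    cases u with
    | nil => simp [insertBy_nil]
    | cons y ys =>
      have : key y = 1 := hu y (by simp)
      simp [insertBy_cons, hx, this]
  | cons z f ih =>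
    have hz : key z = 0 := hf z (by simp)
    simp only [List.cons_append, insertBy_cons, hx, hz]
    simp [ih (fun y hy => hf y (by simp [hy]))]

theorem fold01 {α : Type} (key : α → Nat) (hkey : ∀ y, key y = 0 ∨ key y = 1)
    (l : List α) (f u : List α) (hf : ∀ y ∈ f, key y = 0) (hu : ∀ y ∈ u, key y = 1) :
    l.foldl (fun acc x => PySem.List.insertBy (fun a b => decide (key a < key b)) x acc) (f ++ u)
      = (f ++ l.filter (fun y => key y == 0)) ++ (u ++ l.filter (fun y => key y != 0)) := by
  induction l generalizing f u with
  | nil => simp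
  | cons x l ih =>
    rcases hkey x with hx | hx
    · have hf' : ∀ y ∈ f ++ [x], key y = 0 := by
        intro y hy
        rcases List.mem_append.mp hy with h | h
        · exact hf y h
        · simp at h; simpa [h]
      have h1 : PySem.List.insertBy (fun a b => decide (key a < key b)) x (f ++ u) = (f ++ [x]) ++ u := by
        rw [insertBy_zero_mid key x f u hx hf hu]; simp
      simp only [List.foldl_cons, h1]
      rw [ih (f ++ [x]) u hf' hu]
      simp [hx]
    · have hu' : ∀ y ∈ u ++ [x], key y = 1 := by
        intro y hy
        rcases List.mem_append.mp hy with h | h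
        · exact hu y h
        · simp at h; simpa [h]
      have h1 : PySem.List.insertBy (fun a b => decide (key a < key b)) x (f ++ u) = f ++ (u ++ [x]) := by
        have := PySem.List.insertBy_of_forall_not_before (fun a b => decide (key a < key b)) x (f ++ u)
          (by intro y hy
              rcases List.mem_append.mp hy with h | h
              · simp [hx, hf y h]
              · simp [hx, hu y h])
        rw [this]; simp
      simp only [List.foldl_cons, h1]
      rw [ih f (u ++ [x]) hf hu']
      simp [hx]

theorem sorted01 {α : Type} (key : α → Nat) (hkey : ∀ y, key y = 0 ∨ key y = 1) (l : List α) :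
    PySem.List.sorted l key false
      = l.filter (fun y => key y == 0) ++ l.filter (fun y => key y != 0) := by
  rw [PySem.List.sorted_eq_foldl_insertBy]
  simpa using fold01 key hkey l [] [] (by simp) (by simp)

-- characterisation of A's two-accumulator loop
theorem foldA (l : List String) (a b : List String) :
    l.foldl (fun (acc : List String × List String) img_url =>
      if skipKeywords.any (fun skip => PySem.Str.isIn skip (PySem.Str.lower img_url)) then acc
      else if prioKeywords.any (fun priority => PySem.Str.isIn priority (PySem.Str.lower img_url)) then
        (acc.1 ++ [img_url], acc.2)
      else (acc.1, acc.2 ++ [img_url])) (a, b)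
    = (a ++ l.filter (fun u => !isSkip u && priorityKey u == 0),
       b ++ l.filter (fun u => !isSkip u && priorityKey u != 0)) := by
  induction l generalizing a b with
  | nil => simp
  | cons x l ih =>
    by_cases hs : skipKeywords.any (fun k => PySem.Str.isIn k (PySem.Str.lower x)) = true
    · have hs' : isSkip x = true := hs
      simp only [List.foldl_cons, hs, if_true]
      rw [ih]
      simp [hs']
    · have hs' : isSkip x = false := by simpa [isSkip] using hs
      by_cases hp : prioKeywords.any (fun k => PySem.Str.isIn k (PySem.Str.lower x)) = true
      · have hp' : priorityKey x = 0 := by unfold priorityKey; rw [if_pos hp]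
        simp only [List.foldl_cons, hs, hp, if_true]
        rw [ih]
        simp [hs', hp']
      · have hp' : priorityKey x = 1 := by unfold priorityKey; rw [if_neg hp]
        simp only [List.foldl_cons, hs, hp]
        rw [ih]
        simp [hs', hp']

theorem alt_eq (l : List String) :
    filter_property_images_alt l
      = ((l.filter (fun u => !isSkip u && priorityKey u == 0))
         ++ (l.filter (fun u => !isSkip u && priorityKey u != 0))).take 5 := by
  unfold filter_property_images_alt
  rw [sorted01 priorityKey (by intro y; unfold priorityKey; split_ifs <;> simp)]
  simp [List.filter_filter, Bool.and_comm]

-- ===== VERDICT (by name: the statement is the Claim_ definition above) =====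
theorem filter_property_images_spec : Claim_equal_filter_property_images := by
  intro l _
  show filter_property_images l = filter_property_images_alt l
  unfold filter_property_images
  by_cases h : l = []
  · subst h; simp [filter_property_images_alt, PySem.List.sorted]
  · rw [if_neg h, alt_eq]
    rw [foldA l [] []]
    simp
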